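-- pv_equiv track=rewrite | github.com/khahnmad/MA-Thesis_Fringe-to-Familiar | Reconstruction_Phase/Tracking/Pipeline/peripheral_matching.py | find_represented_datasets
-- ===== SOURCE A (Python) =====
-- def find_represented_datasets(data:dict)->dict:
--     datasets = {} # Take dict of cluster_id: dataset names and turn it into a dict with dataset_name: cluster_id
--     for k in data.keys():
--         for elt in data[k]:
--             if elt[0] not in datasets.keys():
--                 datasets[elt[0]] =[]
--             if elt[1] not in datasets[elt[0]]:
--                 datasets[elt[0]].append(elt[1])
--     return datasets
-- ===== SOURCE B (Python) =====
-- def find_represented_datasets(data: dict) -> dict: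
--     # Two-pass decomposition: first group every elt[1] under elt[0] with no
--     # membership check, then collapse duplicates per key with dict.fromkeys.
--     groups = {}
--     for vals in data.values():
--         for elt in vals:
--             groups.setdefault(elt[0], []).append(elt[1])
--     return {k: list(dict.fromkeys(v)) for k, v in groups.items()}
-- ===== Notes on version B (the rewrite author's own statement) =====
-- stated objective: alternative
-- what changed: A dedups inside the grouping loop with an O(len) 'not in' list scan per appended element; B is a two-pass decomposition: a blind setdefault/append grouping pass, then a per-key dict.fromkeys dedup pass (hash-based), removing the inner membership scan.
import Mathlib
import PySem

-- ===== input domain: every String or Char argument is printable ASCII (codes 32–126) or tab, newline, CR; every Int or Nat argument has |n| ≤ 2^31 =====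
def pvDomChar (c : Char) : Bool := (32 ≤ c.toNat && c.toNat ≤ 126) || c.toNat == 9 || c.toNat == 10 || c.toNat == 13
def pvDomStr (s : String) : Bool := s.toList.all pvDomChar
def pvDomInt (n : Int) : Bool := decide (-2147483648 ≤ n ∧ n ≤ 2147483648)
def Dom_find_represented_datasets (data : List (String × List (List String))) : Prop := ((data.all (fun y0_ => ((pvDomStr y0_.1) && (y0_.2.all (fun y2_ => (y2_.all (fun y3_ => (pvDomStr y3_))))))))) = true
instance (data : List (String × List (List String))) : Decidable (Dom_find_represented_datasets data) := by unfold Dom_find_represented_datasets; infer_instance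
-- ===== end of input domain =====

-- B replaces A's grouped-and-deduped single loop by two passes: a blind grouping
-- pass (setdefault+append), then a per-key dedup pass (dict.fromkeys); alternative decomposition, same results.

-- ===== PORT A =====
-- one iteration of A's inner loop body (membership-checked insert/append)
def pvStepA (ds : PySem.Dict String (List String)) (elt : List String) : PySem.Dict String (List String) :=
  let e0 := PySem.List.pyGetD elt 0 ""
  let e1 := PySem.List.pyGetD elt 1 ""
  let ds1 := if ds.contains e0 then ds else ds.insert e0 ([] : List String)
  if (ds1.getD e0 []).contains e1 then ds1 else ds1.insert e0 (ds1.getD e0 [] ++ [e1])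

def find_represented_datasets (data : List (String × List (List String))) : List (String × List String) :=
  ((PySem.Dict.ofList data).keys.foldl
    (fun ds k => ((PySem.Dict.ofList data).getD k []).foldl pvStepA ds) PySem.Dict.empty).items

-- ===== PORT B =====
-- one iteration of B's first-pass loop body (groups.setdefault(elt[0], []).append(elt[1]))
def pvStepB (g : PySem.Dict String (List String)) (elt : List String) : PySem.Dict String (List String) :=
  g.modify (PySem.List.pyGetD elt 0 "") [] (· ++ [PySem.List.pyGetD elt 1 ""])

def find_represented_datasets_alt (data : List (String × List (List String))) : List (String × List String) :=
  (((PySem.Dict.ofList data).values.foldl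
      (fun g vals => vals.foldl pvStepB g) PySem.Dict.empty).items).map
    (fun p => (p.1, PySem.List.dedup p.2))

-- ===== PRECONDITION & SPEC =====
-- Pre_ excludes exactly the inputs on which Python A raises IndexError: some inner element list
-- has fewer than 2 entries (A reads elt[0] and elt[1]).
def Pre_find_represented_datasets (data : List (String × List (List String))) : Prop :=
  ∀ p ∈ data, ∀ e ∈ p.2, 2 ≤ e.length
instance (data : List (String × List (List String))) : Decidable (Pre_find_represented_datasets data) := by unfold Pre_find_represented_datasets; infer_instance

def pvWitness_find_represented_datasets : (List (String × List (List String))) :=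
  [("c1", [["d1", "x"], ["d1", "y"], ["d2", "x"]]), ("c2", [["d1", "x"]])]

def Spec_find_represented_datasets (data : List (String × List (List String))) (out : List (String × List String)) : Prop := out = find_represented_datasets_alt data
instance (data : List (String × List (List String))) (out : List (String × List String)) : Decidable (Spec_find_represented_datasets data out) := by unfold Spec_find_represented_datasets; infer_instance

-- ===== CLAIM (what is proved, stated in full; the proofs are below) =====
def Claim_equal_find_represented_datasets : Prop := ∀ (data : List (String × List (List String))), Dom_find_represented_datasets data → Pre_find_represented_datasets data → Spec_find_represented_datasets data (find_represented_datasets data)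

-- ===== LEMMAS AND PROOFS =====

-- the invariant relating A's dict to B's first-pass dict
def pvInv (g d : PySem.Dict String (List String)) : Prop :=
  d.keys = g.keys ∧ d.keys.Nodup ∧ ∀ c, d.getD c [] = PySem.List.dedup (g.getD c [])

theorem pvInv_core (g d : PySem.Dict String (List String)) (a v : String) (h : pvInv g d) :
    pvInv (g.modify a [] (· ++ [v]))
      (if ((if d.contains a then d else d.insert a []).getD a []).contains v
       then (if d.contains a then d else d.insert a [])
       else (if d.contains a then d else d.insert a []).insert a
              ((if d.contains a then d else d.insert a []).getD a [] ++ [v])) := by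
  obtain ⟨h1, h2, h3⟩ := h
  have hcon : d.contains a = g.contains a := by
    rw [PySem.Dict.contains_eq_decide_mem_keys, PySem.Dict.contains_eq_decide_mem_keys, h1]
  have hkeysB : (g.modify a [] (· ++ [v])).keys =
      if g.contains a then g.keys else g.keys ++ [a] := by
    rw [PySem.Dict.keys_modify]
    rcases hgc : g.contains a with _ | _
    · simp [PySem.Dict.keys_insert_of_not_contains g _ hgc]
    · simp [PySem.Dict.keys_insert_of_contains g _ hgc]
  have hgetB : ∀ c, (g.modify a [] (· ++ [v])).getD c [] =
      if c = a then g.getD a [] ++ [v] else g.getD c [] :=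
    fun c => PySem.Dict.getD_modify g a c [] _
  have key : ∀ xs : List String, PySem.List.dedup (xs ++ [v]) =
      if v ∈ PySem.List.dedup xs then PySem.List.dedup xs else PySem.List.dedup xs ++ [v] := by
    intro xs
    rw [PySem.List.dedup_eq_ofList, PySem.List.dedup_eq_ofList,
        PySem.Set.ofList_append_singleton, PySem.Set.add_eq_ite]
  rcases hgc : g.contains a with _ | _
  · -- key absent in both dicts
    have hdc : d.contains a = false := by rw [hcon, hgc]
    have h0 : g.getD a [] = [] := PySem.Dict.getD_of_not_contains g [] hgc
    have hanot : a ∉ d.keys := by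
      simpa [PySem.Dict.contains_eq_decide_mem_keys] using hdc
    simp only [hdc, Bool.false_eq_true, if_false, PySem.Dict.getD_insert_self]
    simp only [List.contains, List.elem_nil, Bool.false_eq_true, if_false, List.nil_append]
    refine ⟨?_, ?_, ?_⟩
    · rw [PySem.Dict.keys_insert_of_contains _ _ (PySem.Dict.contains_insert_self d a []),
          PySem.Dict.keys_insert_of_not_contains d _ hdc, hkeysB, hgc, h1]
      simp
    · rw [PySem.Dict.keys_insert_of_contains _ _ (PySem.Dict.contains_insert_self d a []),
          PySem.Dict.keys_insert_of_not_contains d _ hdc]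
      exact List.Nodup.append h2 (List.nodup_singleton a) (by simpa using hanot)
    · intro c
      rw [hgetB c, PySem.Dict.getD_insert]
      by_cases hca : c = a
      · simp [hca, h0, PySem.List.dedup, PySem.Set.ofList]
      · simp [hca, PySem.Dict.getD_insert_of_ne d _ _ hca, h3 c]
  · -- key present in both dicts
    have hdc : d.contains a = true := by rw [hcon, hgc]
    have hga : d.getD a [] = PySem.List.dedup (g.getD a []) := h3 a
    simp only [hdc, if_true]
    have hkA : ∀ w : List String, (d.insert a w).keys = d.keys :=
      fun w => PySem.Dict.keys_insert_of_contains d _ hdc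
    by_cases hv : v ∈ d.getD a []
    · have hvb : (d.getD a []).contains v = true := by simpa using hv
      have hv' : v ∈ PySem.List.dedup (g.getD a []) := hga ▸ hv
      simp only [hvb, if_true]
      refine ⟨by simp [hkeysB, hgc, h1], h2, ?_⟩
      intro c
      rw [hgetB c]
      by_cases hca : c = a
      · subst hca; rw [if_pos rfl, key, if_pos hv', ← hga]
      · rw [if_neg hca]; exact h3 c
    · have hvb : (d.getD a []).contains v = false := by simpa using hv
      have hv' : v ∉ PySem.List.dedup (g.getD a []) := fun hmem => hv (by rw [hga]; exact hmem)
      simp only [hvb, Bool.false_eq_true, if_false]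
      refine ⟨by simp [hkA, hkeysB, hgc, h1], by rw [hkA]; exact h2, ?_⟩
      intro c
      rw [hgetB c, PySem.Dict.getD_insert]
      by_cases hca : c = a
      · subst hca; rw [if_pos rfl, if_pos rfl, key, if_neg hv', hga]
      · rw [if_neg hca, if_neg hca]; exact h3 c

theorem pvInv_step (g d : PySem.Dict String (List String)) (e : List String)
    (h : pvInv g d) : pvInv (pvStepB g e) (pvStepA d e) := by
  simpa only [pvStepA, pvStepB] using
    pvInv_core g d (PySem.List.pyGetD e 0 "") (PySem.List.pyGetD e 1 "") h

theorem pvInv_foldl (l : List (List String)) (g d : PySem.Dict String (List String))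
    (h : pvInv g d) : pvInv (l.foldl pvStepB g) (l.foldl pvStepA d) := by
  induction l generalizing g d with
  | nil => exact h
  | cons e t ih => exact ih _ _ (pvInv_step g d e h)

theorem pvInv_foldl2 (ks : List String) (F : String → List (List String))
    (g d : PySem.Dict String (List String)) (h : pvInv g d) :
    pvInv (ks.foldl (fun g k => (F k).foldl pvStepB g) g)
          (ks.foldl (fun d k => (F k).foldl pvStepA d) d) := by
  induction ks generalizing g d with
  | nil => exact h
  | cons k t ih => exact ih _ _ (pvInv_foldl (F k) g d h)

theorem pvInv_items (g d : PySem.Dict String (List String)) (h : pvInv g d) :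
    d.items = g.items.map (fun p => (p.1, PySem.List.dedup p.2)) := by
  obtain ⟨h1, h2, h3⟩ := h
  rw [PySem.Dict.items_eq_map_keys d h2 [], PySem.Dict.items_eq_map_keys g (h1 ▸ h2) [],
      List.map_map, h1]
  exact List.map_congr_left (fun k _ => by simp [h3 k])

-- ===== VERDICT (by name: the statement is the Claim_ definition above) =====
theorem find_represented_datasets_spec : Claim_equal_find_represented_datasets := by
  intro data _ _
  unfold Spec_find_represented_datasets find_represented_datasets find_represented_datasets_alt
  rw [PySem.Dict.values_eq_map_keys (PySem.Dict.ofList data) (PySem.Dict.nodup_keys_ofList data) [],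
      List.foldl_map]
  exact pvInv_items _ _ (pvInv_foldl2 (PySem.Dict.ofList data).keys
    (fun k => (PySem.Dict.ofList data).getD k []) PySem.Dict.empty PySem.Dict.empty
    ⟨by simp [PySem.Dict.keys_empty], by simp [PySem.Dict.keys_empty], fun c => by simp [PySem.Dict.getD_empty, PySem.List.dedup]⟩)
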